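-- pv_equiv track=rewrite | github.com/Charliesj0129/subhft | scripts/report_narrative.py | group_checks_by_category
-- ===== SOURCE A (Python) =====
-- _CATEGORY_MAP: dict[str, str] = {
--     "service_": "Infrastructure",
--     "feed_": "Market Data Feed",
--     "restart_": "Service Restarts",
--     "session_": "Session Management",
--     "stormguard_": "Risk / StormGuard",
--     "wal_": "Persistence / WAL",
--     "docker_": "Docker / Containers",
-- }
--
-- def group_checks_by_category(checks: list[dict]) -> dict[str, list]:
--     """Group checks into categories by check_id prefix.
--
--     Returns a dict mapping category name to list of checks.
--     """
--     groups: dict[str, list] = {}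
--     for c in checks:
--         check_id = str(c.get("id", ""))
--         category = "Other"
--         for prefix, cat in _CATEGORY_MAP.items():
--             if check_id.startswith(prefix):
--                 category = cat
--                 break
--         groups.setdefault(category, []).append(c)
--     return groups
-- ===== SOURCE B (Python) =====
-- _CATEGORY_MAP: dict[str, str] = {
--     "service_": "Infrastructure",
--     "feed_": "Market Data Feed",
--     "restart_": "Service Restarts",
--     "session_": "Session Management",
--     "stormguard_": "Risk / StormGuard",
--     "wal_": "Persistence / WAL",
--     "docker_": "Docker / Containers",
-- }
--
-- def group_checks_by_category(checks: list[dict]) -> dict[str, list]: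
--     """Group checks into categories by check_id prefix (computed-key lookup)."""
--     groups: dict[str, list] = {}
--     for c in checks:
--         head, sep, _tail = str(c.get("id", "")).partition("_")
--         category = _CATEGORY_MAP.get(head + sep, "Other")
--         groups.setdefault(category, []).append(c)
--     return groups
-- ===== Notes on version B (the rewrite author's own statement) =====
-- stated objective: idiomatic
-- what changed: A's inner loop scanning _CATEGORY_MAP with startswith and break is replaced by computing the lookup key directly (partition the id at its first underscore, head+sep) and a single dict.get, eliminating the inner prefix-scan loop.
import Mathlib
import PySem

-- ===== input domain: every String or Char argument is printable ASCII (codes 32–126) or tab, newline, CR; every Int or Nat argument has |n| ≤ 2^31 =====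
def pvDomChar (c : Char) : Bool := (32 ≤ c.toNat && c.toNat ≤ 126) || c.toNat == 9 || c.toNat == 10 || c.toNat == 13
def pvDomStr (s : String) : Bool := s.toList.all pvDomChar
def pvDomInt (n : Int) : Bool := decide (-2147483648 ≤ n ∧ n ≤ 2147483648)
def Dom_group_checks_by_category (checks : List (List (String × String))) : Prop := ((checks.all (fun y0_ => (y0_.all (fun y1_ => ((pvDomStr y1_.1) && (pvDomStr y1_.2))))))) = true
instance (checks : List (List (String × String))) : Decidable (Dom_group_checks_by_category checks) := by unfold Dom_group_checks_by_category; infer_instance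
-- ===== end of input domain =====

-- B replaces A's inner prefix-scan loop (startswith + break over _CATEGORY_MAP) by a computed
-- key: partition the id at its first '_' and look head+sep up in the map once (idiomatic).

-- ===== PORT A =====

-- _CATEGORY_MAP, in insertion order
def pvCatItems : List (String × String) :=
  [("service_", "Infrastructure"),
   ("feed_", "Market Data Feed"),
   ("restart_", "Service Restarts"),
   ("session_", "Session Management"),
   ("stormguard_", "Risk / StormGuard"),
   ("wal_", "Persistence / WAL"),
   ("docker_", "Docker / Containers")]

-- A's inner loop: category = "Other"; for prefix, cat in _CATEGORY_MAP.items(): if startswith: category = cat; break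
def pvScanCat : List (String × String) → String → String
  | [], _ => "Other"
  | (prefx, cat) :: rest, checkId =>
      if PySem.Str.startswith checkId prefx then cat else pvScanCat rest checkId

def group_checks_by_category (checks : List (List (String × String))) : List (String × List (List (String × String))) :=
  (checks.foldl (fun groups c =>
      let checkId := (PySem.Dict.mk c).getD "id" ""        -- str(c.get("id", "")) : values are str already
      let category := pvScanCat pvCatItems checkId
      -- groups.setdefault(category, []).append(c)
      groups.modify category [] (fun l => l ++ [c]))
    PySem.Dict.empty).items

-- ===== PORT B =====

-- head, sep, _tail = s.partition("_"); key = head + sep   (exact: head = chars before the first '_',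
-- sep = "_" iff '_' occurs in s, else "")
def pvPartitionKey (cs : List Char) : List Char :=
  let head := cs.takeWhile (fun c => c != '_')
  if cs.any (fun c => c == '_') then head ++ ['_'] else head

def group_checks_by_category_alt (checks : List (List (String × String))) : List (String × List (List (String × String))) :=
  (checks.foldl (fun groups c =>
      let key := String.ofList (pvPartitionKey ((PySem.Dict.mk c).getD "id" "").toList)
      let category := (PySem.Dict.mk pvCatItems).getD key "Other"   -- _CATEGORY_MAP.get(key, "Other")
      groups.modify category [] (fun l => l ++ [c]))
    PySem.Dict.empty).items

-- ===== PRECONDITION & SPEC =====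
def Spec_group_checks_by_category (checks : List (List (String × String))) (out : List (String × List (List (String × String)))) : Prop := out = group_checks_by_category_alt checks
instance (checks : List (List (String × String))) (out : List (String × List (List (String × String)))) : Decidable (Spec_group_checks_by_category checks out) := by unfold Spec_group_checks_by_category; infer_instance

-- ===== CLAIM (what is proved, stated in full; the proofs are below) =====
def Claim_equal_group_checks_by_category : Prop := ∀ (checks : List (List (String × String))), Dom_group_checks_by_category checks → Spec_group_checks_by_category checks (group_checks_by_category checks)

-- ===== LEMMAS AND PROOFS =====



-- a prefix "w_" (with '_' not in w) starts the id  ↔  the id's partition key is exactly "w_"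
theorem pvPrefix_iff_key (l w : List Char) (hw : ∀ c ∈ w, c ≠ '_') :
    (w ++ ['_']) <+: l ↔ pvPartitionKey l = w ++ ['_'] := by
  unfold pvPartitionKey
  constructor
  · rintro ⟨t, ht⟩
    subst ht
    have htw : (w ++ '_' :: t).takeWhile (fun c => c != '_') = w := by
      rw [List.takeWhile_append]
      simp_all
    simp_all
  · intro h
    by_cases hany : l.any (fun c => c == '_')
    · simp only [hany, if_pos] at h
      have hw' : l.takeWhile (fun c => c != '_') = w := by
        have := List.append_cancel_right h
        exact this
      have : l = l.takeWhile (fun c => c != '_') ++ l.dropWhile (fun c => c != '_') := (List.takeWhile_append_dropWhile).symm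
      rw [hw'] at this
      have hne : l.dropWhile (fun c => c != '_') ≠ [] := by
        intro hnil
        rw [hnil, List.append_nil] at this
        subst this
        rw [List.any_eq_true] at hany
        obtain ⟨c, hc, hc'⟩ := hany
        exact hw c hc (by simpa using hc')
      obtain ⟨c, t, hct⟩ := List.exists_cons_of_ne_nil hne
      have hc : c = '_' := by
        have h2 := List.head_dropWhile_not (fun c => c != '_') hne
        simp only [hct, List.head_cons] at h2
        simpa using h2
      subst hc
      exact ⟨t, by rw [this, hct]; simp⟩
    · simp only [hany, if_neg, Bool.false_eq_true, not_false_iff] at h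
      exfalso
      have : '_' ∈ l.takeWhile (fun c => c != '_') := by rw [h]; simp
      have := List.mem_takeWhile_imp this
      simp at this

-- A's prefix scan computes B's computed-key lookup, for every id
set_option maxRecDepth 8192 in
theorem pvScan_eq_lookup (s : String) :
    pvScanCat pvCatItems s = (PySem.Dict.mk pvCatItems).getD (String.ofList (pvPartitionKey s.toList)) "Other" := by
  have hsw : ∀ (p w : List Char), (∀ c ∈ w, c ≠ '_') → p = w ++ ['_'] →
      PySem.Chars.startswith s.toList p = decide (pvPartitionKey s.toList = p) := by
    intro p w hw hp
    subst hp
    rw [Bool.eq_iff_iff, PySem.Chars.startswith_iff, decide_eq_true_iff]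
    exact pvPrefix_iff_key s.toList w hw
  have hbeq : ∀ (p : String) (K : List Char), (p == String.ofList K) = decide (K = p.toList) := by
    intro p K
    rw [Bool.eq_iff_iff, beq_iff_eq, decide_eq_true_iff, String.ext_iff]
    simp [eq_comm]
  simp only [pvScanCat, pvCatItems, PySem.Str.startswith_eq,
    PySem.Dict.getD, PySem.Dict.get?_mk_cons, hbeq]
  rw [hsw "service_".toList ['s','e','r','v','i','c','e'] (by simp) (by decide),
      hsw "feed_".toList ['f','e','e','d'] (by simp) (by decide),
      hsw "restart_".toList ['r','e','s','t','a','r','t'] (by simp) (by decide),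
      hsw "session_".toList ['s','e','s','s','i','o','n'] (by simp) (by decide),
      hsw "stormguard_".toList ['s','t','o','r','m','g','u','a','r','d'] (by simp) (by decide),
      hsw "wal_".toList ['w','a','l'] (by simp) (by decide),
      hsw "docker_".toList ['d','o','c','k','e','r'] (by simp) (by decide)]
  split_ifs <;> rfl

-- ===== VERDICT (by name: the statement is the Claim_ definition above) =====
theorem group_checks_by_category_spec : Claim_equal_group_checks_by_category := by
  intro checks _
  unfold Spec_group_checks_by_category group_checks_by_category group_checks_by_category_alt
  congr 1
  apply PySem.List.foldl_congr_mem
  intro groups c _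
  simp only [pvScan_eq_lookup]
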